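-- pv_equiv track=rewrite | github.com/dhh1128/makemenu | makemenu.py | get_filtered_candidates
-- ===== SOURCE A (Python) =====
-- categories = ["+entree", "+dessert", "+extra"]
--
-- def has_tag(item, tag):
--     return tag in item.get('tags', [])
--
-- def filter_options(options, filter):
--     tag = filter[1:]
--     should_have = bool(filter[0] == '+')
--     return [o for o in options if has_tag(o, tag) == should_have]
--
-- def get_filtered_candidates(options, category, filters_for_day, used):
--     candidates = filter_options(options, category)
--     other_cateogries = [c for c in categories if c != category]
--     for f in filters_for_day:
--         if f not in other_cateogries:
--             candidates = filter_options(candidates, f)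
--     candidates = [c for c in candidates if c not in used]
--     return candidates
-- ===== SOURCE B (Python) =====
-- categories = ["+entree", "+dessert", "+extra"]
--
-- def get_filtered_candidates(options, category, filters_for_day, used):
--     # Build the active filter list once, parse each filter into (tag, should_have),
--     # then keep each option in a single fused pass over `options`.
--     active = [category] + [f for f in filters_for_day
--                            if f == category or f not in categories]
--     preds = [(f[1:], f[0] == '+') for f in active]
--     return [o for o in options
--             if all((tag in o.get('tags', [])) == want for tag, want in preds)
--             and o not in used]
-- ===== Notes on version B (the rewrite author's own statement) =====
-- stated objective: alternative
-- what changed: B builds the list of active (tag, should_have) predicates once and decides each option in a single fused pass, instead of A's repeated list-rebuilding comprehension per filter.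
import Mathlib
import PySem

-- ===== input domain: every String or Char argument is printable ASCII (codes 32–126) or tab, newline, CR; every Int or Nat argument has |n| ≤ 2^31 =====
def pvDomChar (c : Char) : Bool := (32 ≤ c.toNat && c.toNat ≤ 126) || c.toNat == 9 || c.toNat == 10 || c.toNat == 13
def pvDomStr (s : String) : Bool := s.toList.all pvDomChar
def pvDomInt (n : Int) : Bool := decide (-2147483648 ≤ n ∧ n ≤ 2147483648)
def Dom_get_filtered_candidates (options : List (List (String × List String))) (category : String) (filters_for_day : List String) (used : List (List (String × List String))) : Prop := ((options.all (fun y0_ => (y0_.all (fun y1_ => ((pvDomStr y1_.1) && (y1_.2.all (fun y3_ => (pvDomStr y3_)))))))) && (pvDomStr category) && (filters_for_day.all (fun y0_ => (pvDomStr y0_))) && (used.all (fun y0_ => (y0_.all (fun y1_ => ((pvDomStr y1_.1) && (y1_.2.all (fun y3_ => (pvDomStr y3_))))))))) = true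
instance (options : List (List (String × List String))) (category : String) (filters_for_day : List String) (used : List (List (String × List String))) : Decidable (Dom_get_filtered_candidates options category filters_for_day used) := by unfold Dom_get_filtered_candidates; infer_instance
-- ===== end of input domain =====

-- B fuses A's per-filter candidate rebuilding into one predicate pass over options (objective: alternative decomposition).
-- ===== PORT A =====
def pvCategories : List String := ["+entree", "+dessert", "+extra"]

-- tag in item.get('tags', [])  (dict lookup = first match in the association list)
def pvHasTag (item : List (String × List String)) (tag : String) : Bool :=
  ((List.lookup "tags" item).getD []).contains tag

-- Python '==' on dicts ignores insertion order: exact for unique-key association lists.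
def pvDictEq (a b : List (String × List String)) : Bool :=
  a.all (fun kv => List.lookup kv.1 b == some kv.2) && b.all (fun kv => List.lookup kv.1 a == some kv.2)

def pvFilterOptions (options : List (List (String × List String))) (filt : String) : List (List (String × List String)) :=
  let tag := PySem.Str.slice filt (some 1) none
  match PySem.Str.pyGet? filt 0 with
  | none => []   -- filter[0] raises IndexError on the empty string; excluded by Pre_
  | some c => options.filter (fun o => pvHasTag o tag == (c == '+'))

def get_filtered_candidates (options : List (List (String × List String))) (category : String) (filters_for_day : List String) (used : List (List (String × List String))) : List (List (String × List String)) :=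
  let candidates := pvFilterOptions options category
  let other_cateogries := pvCategories.filter (fun c => c != category)
  let candidates := filters_for_day.foldl
    (fun cand f => if other_cateogries.contains f then cand else pvFilterOptions cand f) candidates
  candidates.filter (fun c => !(used.any (fun u => pvDictEq c u)))

-- ===== PORT B =====
def get_filtered_candidates_alt (options : List (List (String × List String))) (category : String) (filters_for_day : List String) (used : List (List (String × List String))) : List (List (String × List String)) :=
  let active := category :: filters_for_day.filter (fun f => f == category || !(pvCategories.contains f))
  let preds := active.map (fun f => (PySem.Str.slice f (some 1) none, PySem.Str.pyGet? f 0 == some '+'))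
  options.filter (fun o =>
    preds.all (fun p => pvHasTag o p.1 == p.2) && !(used.any (fun u => pvDictEq o u)))

-- ===== PRECONDITION & SPEC =====
-- Pre_ excludes exactly the inputs where A raises IndexError (filter[0] on an empty filter string).
def Pre_get_filtered_candidates (options : List (List (String × List String))) (category : String) (filters_for_day : List String) (used : List (List (String × List String))) : Prop :=
  category ≠ "" ∧ ∀ f ∈ filters_for_day, f ≠ ""
instance (options : List (List (String × List String))) (category : String) (filters_for_day : List String) (used : List (List (String × List String))) : Decidable (Pre_get_filtered_candidates options category filters_for_day used) := by unfold Pre_get_filtered_candidates; infer_instance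

def pvWitness_get_filtered_candidates : (List (List (String × List String))) × String × List String × (List (List (String × List String))) :=
  ([[("tags", ["entree"])], [("tags", ["x"])]], "+entree", ["+x"], [])

def Spec_get_filtered_candidates (options : List (List (String × List String))) (category : String) (filters_for_day : List String) (used : List (List (String × List String))) (out : List (List (String × List String))) : Prop := out = get_filtered_candidates_alt options category filters_for_day used
instance (options : List (List (String × List String))) (category : String) (filters_for_day : List String) (used : List (List (String × List String))) (out : List (List (String × List String))) : Decidable (Spec_get_filtered_candidates options category filters_for_day used out) := by unfold Spec_get_filtered_candidates; infer_instance

-- ===== CLAIM (what is proved, stated in full; the proofs are below) =====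
def Claim_equal_get_filtered_candidates : Prop := ∀ (options : List (List (String × List String))) (category : String) (filters_for_day : List String) (used : List (List (String × List String))), Dom_get_filtered_candidates options category filters_for_day used → Pre_get_filtered_candidates options category filters_for_day used → Spec_get_filtered_candidates options category filters_for_day used (get_filtered_candidates options category filters_for_day used)

-- ===== LEMMAS AND PROOFS =====

-- B's per-filter predicate.
def pvPredB (f : String) (o : List (String × List String)) : Bool :=
  pvHasTag o (PySem.Str.slice f (some 1) none) == (PySem.Str.pyGet? f 0 == some '+')

theorem pvFilterOptions_eq (xs : List (List (String × List String))) (f : String) (hf : f ≠ "") :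
    pvFilterOptions xs f = xs.filter (pvPredB f) := by
  obtain ⟨c, hc⟩ : ∃ c, PySem.Str.pyGet? f 0 = some c := by
    have hl : f.toList ≠ [] := by
      intro h; apply hf; ext1; simp [h]
    cases hl2 : f.toList with
    | nil => exact absurd hl2 hl
    | cons a t => exact ⟨a, by simp [hl2]⟩
  simp only [pvFilterOptions, hc]
  have he : (fun o => pvHasTag o (PySem.Str.slice f (some 1) none) == (c == '+')) = pvPredB f := by
    funext o; simp only [pvPredB]; rw [hc]; simp
  rw [he]

theorem pvOther_contains (cat f : String) (l : List String) :
    ((l.filter (fun c => c != cat)).contains f)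
      = !(f == cat || !(l.contains f)) := by
  rw [Bool.eq_iff_iff]
  simp
  exact and_comm

theorem pvLoop_eq (cat : String) (fs : List String) (xs : List (List (String × List String)))
    (hfs : ∀ f ∈ fs, f ≠ "") :
    fs.foldl (fun cand f => if (pvCategories.filter (fun c => c != cat)).contains f then cand else pvFilterOptions cand f) xs
      = xs.filter (fun o => (fs.filter (fun f => f == cat || !(pvCategories.contains f))).all (fun f => pvPredB f o)) := by
  induction fs generalizing xs with
  | nil => simp
  | cons f rest ih =>
    have hf : f ≠ "" := hfs f (List.mem_cons_self)
    have hrest : ∀ g ∈ rest, g ≠ "" := fun g hg => hfs g (List.mem_cons_of_mem _ hg)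
    rw [List.foldl_cons, pvOther_contains cat f pvCategories]
    by_cases hk : (f == cat || !(pvCategories.contains f)) = true
    · simp only [hk, Bool.not_true, Bool.false_eq_true, if_false]
      rw [pvFilterOptions_eq xs f hf, ih _ hrest, List.filter_filter]
      simp only [List.filter_cons, hk, if_true, List.all_cons]
      apply List.filter_congr
      intro o _
      exact Bool.and_comm _ _
    · have hk' : (f == cat || !(pvCategories.contains f)) = false := Bool.eq_false_iff.mpr hk
      simp only [hk', Bool.not_false, if_true]
      rw [ih _ hrest]
      simp only [List.filter_cons, hk', Bool.false_eq_true, if_false]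

-- ===== VERDICT (by name: the statement is the Claim_ definition above) =====
theorem get_filtered_candidates_spec : Claim_equal_get_filtered_candidates := by
  intro options category ffd used _ hpre
  obtain ⟨hcat, hffd⟩ := hpre
  unfold Spec_get_filtered_candidates
  simp only [get_filtered_candidates, get_filtered_candidates_alt]
  rw [pvFilterOptions_eq _ _ hcat, pvLoop_eq category ffd _ hffd, List.filter_filter,
    List.filter_filter]
  apply List.filter_congr
  intro o _
  simp [List.all_map, pvPredB, Bool.and_comm, Bool.and_left_comm]
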